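-- pv_equiv track=rewrite | github.com/ofirbenesh/prompt-safety-engine | app/pii_redactor.py | redact_email
-- ===== SOURCE A (Python) =====
-- def redact_email(text: str) -> str:
--     result = text
--     i = 0
--
--     while i < len(result):
--         if result[i] == "@":
--             # Expand left
--             start = i - 1
--             while start >= 0 and (result[start].isalnum() or result[start] in "._-"):
--                 start -= 1
--             start += 1
--
--             # Expand right
--             end = i + 1
--             while end < len(result) and (result[end].isalnum() or result[end] in "._-"):
--                 end += 1
--
--             # Replace the email substring
--             result = result[:start] + "<EMAIL>" + result[end:]
--             i = start + len("<EMAIL>")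
--         else:
--             i += 1
--
--     return result
-- ===== SOURCE B (Python) =====
-- def redact_email(text: str) -> str:
--     # Single forward pass: tokenize runs of email characters; a run followed by '@'
--     # (plus the run after the '@') becomes one <EMAIL>, anything else is copied.
--     def is_email_char(c: str) -> bool:
--         return c.isalnum() or c in "._-"
--
--     out = []
--     i, n = 0, len(text)
--     while i < n:
--         k = i
--         while k < n and is_email_char(text[k]):
--             k += 1
--         if k < n and text[k] == "@":
--             k += 1
--             while k < n and is_email_char(text[k]):
--                 k += 1
--             out.append("<EMAIL>")
--         else:
--             out.append(text[i:k])
--             if k < n: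
--                 out.append(text[k])
--             k += 1
--         i = k
--     return "".join(out)
-- ===== Notes on version B (the rewrite author's own statement) =====
-- stated objective: alternative
-- what changed: Replaced the mutate-and-rescan loop (locate each at-sign, expand left and right over email characters, splice the replacement tag into the string, resume after it) by a single forward tokenizing pass over the original string that recognizes run/at-sign/run spans and emits output pieces, never rebuilding the scanned string.
import Mathlib
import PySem

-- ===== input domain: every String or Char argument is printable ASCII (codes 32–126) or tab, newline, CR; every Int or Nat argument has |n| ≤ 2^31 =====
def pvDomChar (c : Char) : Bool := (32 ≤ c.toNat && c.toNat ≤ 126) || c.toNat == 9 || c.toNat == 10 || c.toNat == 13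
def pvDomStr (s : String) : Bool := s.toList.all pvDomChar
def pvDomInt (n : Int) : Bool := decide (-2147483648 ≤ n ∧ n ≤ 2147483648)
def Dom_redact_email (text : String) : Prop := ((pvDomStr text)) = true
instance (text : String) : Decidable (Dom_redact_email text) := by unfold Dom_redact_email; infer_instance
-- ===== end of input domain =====

-- B replaces A's mutate-and-rescan loop with one forward tokenizing pass (alternative decomposition).

-- ===== PORT A =====
-- `result[j].isalnum() or result[j] in "._-"` (false when out of range; A only evaluates it in range)
def pvClsAtA (r : List Char) (j : Int) : Bool :=
  match PySem.List.pyGet? r j with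
  | some c => PySem.Chars.isalnum c || c == '.' || c == '_' || c == '-'
  | none => false

-- `while start >= 0 and (result[start].isalnum() or result[start] in "._-"): start -= 1`
-- (fuel makes the recursion structural; (start+1).toNat steps always suffice)
def pvExpandLeftGo (r : List Char) : Nat → Int → Int
  | 0, start => start
  | fuel + 1, start =>
    if 0 ≤ start ∧ pvClsAtA r start = true then pvExpandLeftGo r fuel (start - 1) else start

def pvExpandLeft (r : List Char) (start : Int) : Int :=
  pvExpandLeftGo r (start + 1).toNat start

-- `while end < len(result) and (result[end].isalnum() or result[end] in "._-"): end += 1`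
def pvExpandRightGo (r : List Char) : Nat → Int → Int
  | 0, e => e
  | fuel + 1, e =>
    if e < (r.length : Int) ∧ pvClsAtA r e = true then pvExpandRightGo r fuel (e + 1) else e

def pvExpandRight (r : List Char) (e : Int) : Int :=
  pvExpandRightGo r ((r.length : Int) - e).toNat e

def pvEMAIL : List Char := ['<', 'E', 'M', 'A', 'I', 'L', '>']

-- the outer `while i < len(result)` loop; `0 ≤ i` is an invariant of the Python loop
-- (i starts at 0 and only grows), stated in the guard so out-of-range reads cannot occur;
-- the fuel (len(result) - i) strictly decreases at every iteration, so it always suffices.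
def pvLoopAGo : Nat → List Char → Int → List Char
  | 0, r, _ => r
  | fuel + 1, r, i =>
    if 0 ≤ i ∧ i < (r.length : Int) then
      if PySem.List.pyGet? r i = some '@' then
        let s := pvExpandLeft r (i - 1) + 1
        let e := pvExpandRight r (i + 1)
        pvLoopAGo fuel (PySem.List.slice r none (some s) ++ pvEMAIL ++ PySem.List.slice r (some e) none) (s + 7)
      else
        pvLoopAGo fuel r (i + 1)
    else r

def pvLoopA (r : List Char) (i : Int) : List Char :=
  pvLoopAGo ((r.length : Int) - i).toNat r i

def redact_email (text : String) : String := String.mk (pvLoopA text.toList 0)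

-- ===== PORT B =====
-- `c.isalnum() or c in "._-"`
def pvIsEmailChar (c : Char) : Bool :=
  PySem.Chars.isalnum c || c == '.' || c == '_' || c == '-'

-- `while k < n and is_email_char(text[k]): k += 1`: length of the leading run of email chars
def pvRunLen (l : List Char) : Nat :=
  match l with
  | [] => 0
  | c :: t => if pvIsEmailChar c then pvRunLen t + 1 else 0

-- one forward pass over the remaining input: a run followed by '@' (plus the run after it)
-- becomes "<EMAIL>"; otherwise the run and the delimiter are copied; a run reaching the end
-- is copied.  (fuel makes the recursion structural; l.length steps always suffice)
def pvSubstGo : Nat → List Char → List Char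
  | 0, l => l
  | fuel + 1, l =>
    match l.drop (pvRunLen l) with
    | c :: u =>
      if c = '@' then pvEMAIL ++ pvSubstGo fuel (u.drop (pvRunLen u))
      else l.take (pvRunLen l) ++ c :: pvSubstGo fuel u
    | [] => l

def pvSubst (l : List Char) : List Char := pvSubstGo l.length l

def redact_email_alt (text : String) : String := String.mk (pvSubst text.toList)

-- ===== PRECONDITION & SPEC =====
def Spec_redact_email (text : String) (out : String) : Prop := out = redact_email_alt text
instance (text : String) (out : String) : Decidable (Spec_redact_email text out) := by unfold Spec_redact_email; infer_instance

-- ===== CLAIM (what is proved, stated in full; the proofs are below) =====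
def Claim_equal_redact_email : Prop := ∀ (text : String), Dom_redact_email text → Spec_redact_email text (redact_email text)

-- ===== LEMMAS AND PROOFS =====

theorem pvClsAtA_eq_of_get (r : List Char) (j : Int) (c : Char)
    (h : PySem.List.pyGet? r j = some c) : pvClsAtA r j = pvIsEmailChar c := by
  simp [pvClsAtA, pvIsEmailChar, h]

theorem pvRunLen_le (l : List Char) : pvRunLen l ≤ l.length := by
  induction l with
  | nil => simp [pvRunLen]
  | cons c t ih => by_cases h : pvIsEmailChar c = true <;> simp [pvRunLen, h] <;> omega

theorem pvRunLen_all : ∀ (t : List Char), (∀ c ∈ t, pvIsEmailChar c = true) →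
    pvRunLen t = t.length := by
  intro t
  induction t with
  | nil => intro _; rfl
  | cons c u ih =>
    intro h
    have hc := h c (by simp)
    simp [pvRunLen, hc, ih fun x hx => h x (by simp [hx])]

theorem pvRunLen_append : ∀ (t : List Char) (c : Char) (u : List Char),
    (∀ x ∈ t, pvIsEmailChar x = true) → pvIsEmailChar c = false →
    pvRunLen (t ++ c :: u) = t.length := by
  intro t c u
  induction t with
  | nil => intro _ hc; simp [pvRunLen, hc]
  | cons a t' ih =>
    intro ht hc
    have ha := ht a (by simp)
    simp [pvRunLen, ha, ih (fun x hx => ht x (by simp [hx])) hc]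

theorem pvRunLen_take (l : List Char) : ∀ c ∈ l.take (pvRunLen l), pvIsEmailChar c = true := by
  induction l with
  | nil => simp
  | cons a t ih =>
    by_cases ha : pvIsEmailChar a = true
    · simp only [pvRunLen, ha, if_true, List.take_succ_cons]
      intro c hc
      rcases List.mem_cons.mp hc with h | h
      · subst h; exact ha
      · exact ih c h
    · simp [pvRunLen, ha]

theorem pvRunLen_head : ∀ (l : List Char) (c : Char),
    (l.drop (pvRunLen l)).head? = some c → pvIsEmailChar c = false := by
  intro l
  induction l with
  | nil => intro c h; simp [pvRunLen] at h
  | cons a t ih =>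
    intro c h
    by_cases ha : pvIsEmailChar a = true
    · simp only [pvRunLen, ha, if_true, List.drop_succ_cons] at h
      exact ih c h
    · have h0 : pvRunLen (a :: t) = 0 := by simp [pvRunLen, ha]
      rw [h0, List.drop_zero, List.head?_cons, Option.some.injEq] at h
      subst h
      exact Bool.eq_false_iff.mpr ha

theorem pvSubstGo_succ (f : Nat) (l : List Char) (c : Char) (u : List Char)
    (h : l.drop (pvRunLen l) = c :: u) :
    pvSubstGo (f + 1) l =
      if c = '@' then pvEMAIL ++ pvSubstGo f (u.drop (pvRunLen u))
      else l.take (pvRunLen l) ++ c :: pvSubstGo f u := by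
  simp only [pvSubstGo]
  rw [h]

theorem pvSubstGo_succ_nil (f : Nat) (l : List Char) (h : l.drop (pvRunLen l) = []) :
    pvSubstGo (f + 1) l = l := by
  simp only [pvSubstGo]
  rw [h]

theorem pvSubstGo_congr : ∀ (f1 f2 : Nat) (l : List Char), l.length ≤ f1 → l.length ≤ f2 →
    pvSubstGo f1 l = pvSubstGo f2 l := by
  intro f1
  induction f1 with
  | zero =>
    intro f2 l h1 h2
    have hl : l = [] := List.length_eq_zero_iff.mp (by omega)
    subst hl
    cases f2 with
    | zero => rfl
    | succ f2 => rw [pvSubstGo_succ_nil f2 [] (by simp)]; rfl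
  | succ f1 ih =>
    intro f2 l h1 h2
    cases f2 with
    | zero =>
      have hl : l = [] := List.length_eq_zero_iff.mp (by omega)
      subst hl
      rw [pvSubstGo_succ_nil f1 [] (by simp)]
      rfl
    | succ f2 =>
      cases hdrop : l.drop (pvRunLen l) with
      | nil => rw [pvSubstGo_succ_nil f1 l hdrop, pvSubstGo_succ_nil f2 l hdrop]
      | cons c u =>
        have hlen := congrArg List.length hdrop
        simp only [List.length_drop, List.length_cons] at hlen
        have hk := pvRunLen_le l
        rw [pvSubstGo_succ f1 l c u hdrop, pvSubstGo_succ f2 l c u hdrop]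
        by_cases hc : c = '@'
        · rw [if_pos hc, if_pos hc,
            ih f2 (u.drop (pvRunLen u)) (by simp [List.length_drop]; omega)
              (by simp [List.length_drop]; omega)]
        · rw [if_neg hc, if_neg hc, ih f2 u (by omega) (by omega)]

theorem pvSubst_at (l u : List Char) (h : l.drop (pvRunLen l) = '@' :: u) :
    pvSubst l = pvEMAIL ++ pvSubst (u.drop (pvRunLen u)) := by
  have hlen := congrArg List.length h
  simp only [List.length_drop, List.length_cons] at hlen
  have hk := pvRunLen_le l
  have hl : l.length = (l.length - 1) + 1 := by omega
  unfold pvSubst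
  rw [hl, pvSubstGo_succ (l.length - 1) l '@' u h, if_pos rfl,
    pvSubstGo_congr (l.length - 1) (u.drop (pvRunLen u)).length (u.drop (pvRunLen u))
      (by simp [List.length_drop]; omega) (le_refl _)]

theorem pvSubst_char (l : List Char) (c : Char) (u : List Char)
    (h : l.drop (pvRunLen l) = c :: u) (hc : c ≠ '@') :
    pvSubst l = l.take (pvRunLen l) ++ c :: pvSubst u := by
  have hlen := congrArg List.length h
  simp only [List.length_drop, List.length_cons] at hlen
  have hk := pvRunLen_le l
  have hl : l.length = (l.length - 1) + 1 := by omega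
  unfold pvSubst
  rw [hl, pvSubstGo_succ (l.length - 1) l c u h, if_neg hc,
    pvSubstGo_congr (l.length - 1) u.length u (by omega) (le_refl _)]

theorem pvSubst_nil (l : List Char) (h : l.drop (pvRunLen l) = []) : pvSubst l = l := by
  unfold pvSubst
  cases hl : l.length with
  | zero => rfl
  | succ m => simp only [pvSubstGo, h]

theorem pvSubst_all (t : List Char) (h : ∀ c ∈ t, pvIsEmailChar c = true) : pvSubst t = t :=
  pvSubst_nil t (by rw [pvRunLen_all t h]; simp)

theorem pvExpandLeft_eq (r : List Char) (start : Int) :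
    pvExpandLeft r start =
      if 0 ≤ start ∧ pvClsAtA r start = true then pvExpandLeft r (start - 1) else start := by
  unfold pvExpandLeft
  by_cases h : 0 ≤ start ∧ pvClsAtA r start = true
  · rw [if_pos h]
    have hfuel : (start + 1).toNat = (start - 1 + 1).toNat + 1 := by omega
    rw [hfuel]
    simp only [pvExpandLeftGo]
    rw [if_pos h]
  · rw [if_neg h]
    cases hn : (start + 1).toNat with
    | zero => rfl
    | succ m =>
      simp only [pvExpandLeftGo]
      rw [if_neg h]

theorem pvExpandRight_eq (r : List Char) (e : Int) :
    pvExpandRight r e =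
      if e < (r.length : Int) ∧ pvClsAtA r e = true then pvExpandRight r (e + 1) else e := by
  unfold pvExpandRight
  by_cases h : e < (r.length : Int) ∧ pvClsAtA r e = true
  · rw [if_pos h]
    have hfuel : ((r.length : Int) - e).toNat = ((r.length : Int) - (e + 1)).toNat + 1 := by omega
    rw [hfuel]
    simp only [pvExpandRightGo]
    rw [if_pos h]
  · rw [if_neg h]
    cases hn : ((r.length : Int) - e).toNat with
    | zero => rfl
    | succ m =>
      simp only [pvExpandRightGo]
      rw [if_neg h]

theorem pv_el_spec : ∀ (t p rest : List Char), (∀ c ∈ t, pvIsEmailChar c = true) →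
    (∀ c, p.getLast? = some c → pvIsEmailChar c = false) →
    pvExpandLeft (p ++ t ++ rest) ((p.length : Int) + (t.length : Int) - 1) = (p.length : Int) - 1 := by
  intro t
  induction t using List.reverseRecOn with
  | nil =>
    intro p rest ht hp
    rw [pvExpandLeft_eq]
    cases hgl : p.getLast? with
    | none =>
      have hpnil : p = [] := List.getLast?_eq_none_iff.mp hgl
      subst hpnil
      rw [if_neg (by simp)]
      simp
    | some c =>
      have hcl := hp c hgl
      obtain ⟨q, hq⟩ := List.getLast?_eq_some_iff.mp hgl
      subst hq
      have hidx : (((q ++ [c]).length : Nat) : Int) + ((([] : List Char).length : Nat) : Int) - 1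
          = ((q.length : Nat) : Int) := by simp
      have hget : PySem.List.pyGet? ((q ++ [c]) ++ [] ++ rest) ((q.length : Nat) : Int) = some c := by
        have hre : (q ++ [c]) ++ [] ++ rest = q ++ c :: rest := by simp
        rw [hre]
        exact PySem.List.pyGet?_append_length q rest c
      rw [if_neg]
      · simp
      · rw [hidx, pvClsAtA_eq_of_get _ _ _ hget]
        simp [hcl]
  | append_singleton t' c ih =>
    intro p rest ht hp
    have hc := ht c (by simp)
    have ht' : ∀ x ∈ t', pvIsEmailChar x = true := fun x hx => ht x (by simp [hx])
    rw [pvExpandLeft_eq]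
    have hidx : ((p.length : Nat) : Int) + (((t' ++ [c]).length : Nat) : Int) - 1
        = (((p ++ t').length : Nat) : Int) := by simp; omega
    have hget : PySem.List.pyGet? (p ++ (t' ++ [c]) ++ rest) (((p ++ t').length : Nat) : Int)
        = some c := by
      have hre : p ++ (t' ++ [c]) ++ rest = (p ++ t') ++ c :: rest := by simp
      rw [hre]
      exact PySem.List.pyGet?_append_length (p ++ t') rest c
    rw [if_pos]
    · have harg : ((p.length : Int) + (((t' ++ [c]).length : Nat) : Int) - 1) - 1
          = (p.length : Int) + (t'.length : Int) - 1 := by simp; omega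
      rw [harg]
      have hre2 : p ++ (t' ++ [c]) ++ rest = p ++ t' ++ (c :: rest) := by simp
      rw [hre2]
      exact ih p (c :: rest) ht' hp
    · constructor
      · have : 0 ≤ (((p ++ t').length : Nat) : Int) := by positivity
        omega
      · rw [hidx, pvClsAtA_eq_of_get _ _ _ hget]
        exact hc

theorem pv_er_spec : ∀ (u p rest : List Char), (∀ c ∈ u, pvIsEmailChar c = true) →
    (∀ c, rest.head? = some c → pvIsEmailChar c = false) →
    pvExpandRight (p ++ u ++ rest) (p.length : Int) = (p.length : Int) + (u.length : Int) := by
  intro u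
  induction u with
  | nil =>
    intro p rest hu hr
    rw [pvExpandRight_eq]
    cases hrest : rest with
    | nil =>
      subst hrest
      rw [if_neg (by simp)]
      simp
    | cons c rest' =>
      subst hrest
      have hget : PySem.List.pyGet? (p ++ [] ++ c :: rest') (p.length : Int) = some c := by
        have hre : p ++ [] ++ c :: rest' = p ++ c :: rest' := by simp
        rw [hre]
        exact PySem.List.pyGet?_append_length p rest' c
      rw [if_neg]
      · simp
      · rw [pvClsAtA_eq_of_get _ _ _ hget]
        simp [hr c (by simp)]
  | cons c u' ih =>
    intro p rest hu hr
    have hc := hu c (by simp)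
    have hu' : ∀ x ∈ u', pvIsEmailChar x = true := fun x hx => hu x (by simp [hx])
    rw [pvExpandRight_eq]
    have hget : PySem.List.pyGet? (p ++ c :: u' ++ rest) (p.length : Int) = some c := by
      have hre : p ++ c :: u' ++ rest = p ++ c :: (u' ++ rest) := by simp
      rw [hre]
      exact PySem.List.pyGet?_append_length p (u' ++ rest) c
    rw [if_pos]
    · have hre : p ++ c :: u' ++ rest = (p ++ [c]) ++ u' ++ rest := by simp
      have hidx : (p.length : Int) + 1 = (((p ++ [c]).length : Nat) : Int) := by simp
      rw [hre, hidx, ih (p ++ [c]) rest hu' hr]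
      simp
      omega
    · constructor
      · simp
        omega
      · rw [pvClsAtA_eq_of_get _ _ _ hget]
        exact hc

theorem pv_loop_nil (p t : List Char) (f : Nat) (ht : ∀ c ∈ t, pvIsEmailChar c = true) :
    pvLoopAGo f (p ++ t ++ []) ((p.length : Int) + (t.length : Int)) = p ++ pvSubst (t ++ []) := by
  cases f with
  | zero => simp [pvLoopAGo, pvSubst_all t ht]
  | succ f =>
    simp only [pvLoopAGo]
    rw [if_neg (by simp)]
    simp [pvSubst_all t ht]

theorem pv_loop_inv : ∀ (f : Nat) (rest p t : List Char), rest.length ≤ f →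
    (∀ c ∈ t, pvIsEmailChar c = true) → ('@' ∉ p) →
    (∀ c, p.getLast? = some c → pvIsEmailChar c = false) →
    pvLoopAGo f (p ++ t ++ rest) ((p.length : Int) + (t.length : Int)) = p ++ pvSubst (t ++ rest) := by
  intro f
  induction f with
  | zero =>
    intro rest p t hlen ht hp hlast
    have hnil : rest = [] := List.length_eq_zero_iff.mp (by omega)
    subst hnil
    exact pv_loop_nil p t 0 ht
  | succ f ih =>
    intro rest p t hlen ht hp hlast
    cases rest with
    | nil => exact pv_loop_nil p t (f + 1) ht
    | cons c u =>
      have hget : PySem.List.pyGet? (p ++ t ++ c :: u) ((p.length : Int) + (t.length : Int)) = some c := by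
        have hilen : (p.length : Int) + (t.length : Int) = (((p ++ t).length : Nat) : Int) := by simp
        have hre : p ++ t ++ c :: u = (p ++ t) ++ c :: u := by simp
        rw [hilen, hre]
        exact PySem.List.pyGet?_append_length (p ++ t) u c
      simp only [pvLoopAGo]
      rw [if_pos ⟨by positivity, by simp <;> omega⟩]
      by_cases hcat : c = '@'
      · -- '@' found: expand, splice "<EMAIL>", jump past it
        subst hcat
        rw [if_pos hget]
        have hs := pv_el_spec t p ('@' :: u) ht hlast
        set k := pvRunLen u with hk
        have hk_le : k ≤ u.length := pvRunLen_le u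
        have hsplit : p ++ t ++ '@' :: u = (p ++ t ++ ['@']) ++ u.take k ++ u.drop k := by
          simp
        have he : pvExpandRight (p ++ t ++ '@' :: u) (((p.length : Int) + (t.length : Int)) + 1)
            = ((p.length : Int) + (t.length : Int) + 1) + (k : Int) := by
          have hidx1 : ((p.length : Int) + (t.length : Int)) + 1
              = (((p ++ t ++ ['@']).length : Nat) : Int) := by simp <;> omega
          rw [hidx1, hsplit, pv_er_spec (u.take k) (p ++ t ++ ['@']) (u.drop k)
            (pvRunLen_take u) (fun x hx => pvRunLen_head u x hx)]
          simp only [List.length_append, List.length_take, List.length_cons, List.length_nil,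
            min_eq_left hk_le]
          all_goals (push_cast; ring_nf)
        have hslice1 : PySem.List.slice (p ++ t ++ '@' :: u) none (some ((p.length : Int) - 1 + 1))
            = p := by
          have hc1 : (p.length : Int) - 1 + 1 = ((p.length : Nat) : Int) := by omega
          rw [hc1, PySem.List.slice_to_natCast]
          simp
        have hslice2 : PySem.List.slice (p ++ t ++ '@' :: u)
            (some ((p.length : Int) + (t.length : Int) + 1 + (k : Int))) none = u.drop k := by
          have hc2 : (p.length : Int) + (t.length : Int) + 1 + (k : Int)
              = (((p.length + t.length + 1 + k : Nat)) : Int) := by push_cast; ring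
          rw [hc2, PySem.List.slice_from_natCast]
          have h1 : p ++ t ++ '@' :: u = (p ++ t ++ ['@']) ++ u := by simp
          have h2 : p.length + t.length + 1 + k = (p ++ t ++ ['@']).length + k := by simp <;> omega
          rw [h1, h2]
          exact List.drop_length_add_append k
        rw [hs, he]
        simp only [hslice1, hslice2]
        have harg : (p.length : Int) - 1 + 1 + 7
            = (((p ++ pvEMAIL).length : Nat) : Int) + ((([] : List Char).length : Nat) : Int) := by
          simp [pvEMAIL]
        rw [harg]
        have hre : p ++ pvEMAIL ++ u.drop k = (p ++ pvEMAIL) ++ [] ++ u.drop k := by simp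
        rw [hre, ih (u.drop k) (p ++ pvEMAIL) [] (by simp at hlen ⊢; omega) (by simp)
          (by intro hmem
              rcases List.mem_append.mp hmem with hm | hm
              · exact hp hm
              · revert hm; decide)
          (by intro x hx
              simp [List.getLast?_append, pvEMAIL] at hx
              subst hx
              decide)]
        rw [pvSubst_at (t ++ '@' :: u) u
          (by rw [pvRunLen_append t '@' u ht (by decide)]; simp)]
        simp [← hk]
      · -- not '@': advance one character
        rw [if_neg (by rw [hget]; simp [hcat])]
        by_cases hcc : pvIsEmailChar c = true
        · have hre : p ++ t ++ c :: u = p ++ (t ++ [c]) ++ u := by simp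
          have hidx : (p.length : Int) + (t.length : Int) + 1
              = (p.length : Int) + (((t ++ [c]).length : Nat) : Int) := by simp; omega
          rw [hre, hidx, ih u p (t ++ [c]) (by simp at hlen; omega)
            (by intro x hx
                rcases List.mem_append.mp hx with h | h
                · exact ht x h
                · simp at h; subst h; exact hcc)
            hp hlast]
          simp
        · have hccf : pvIsEmailChar c = false := Bool.eq_false_iff.mpr hcc
          have hre : p ++ t ++ c :: u = (p ++ t ++ [c]) ++ [] ++ u := by simp
          have hidx : (p.length : Int) + (t.length : Int) + 1
              = (((p ++ t ++ [c]).length : Nat) : Int) + ((([] : List Char).length : Nat) : Int) := by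
            simp; omega
          rw [hre, hidx, ih u (p ++ t ++ [c]) [] (by simp at hlen; omega) (by simp)
            (by intro hmem
                rcases List.mem_append.mp hmem with hm | hm
                · rcases List.mem_append.mp hm with h1 | h1
                  · exact hp h1
                  · have hbad := ht '@' h1
                    revert hbad; decide
                · simp at hm; exact hcat hm.symm)
            (by intro x hx
                simp [List.getLast?_append] at hx
                subst hx
                exact hccf)]
          rw [pvSubst_char (t ++ c :: u) c u
            (by rw [pvRunLen_append t c u ht hccf]; simp) hcat]
          have htake : (t ++ c :: u).take (pvRunLen (t ++ c :: u)) = t := by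
            rw [pvRunLen_append t c u ht hccf]
            simp
          rw [htake]
          simp

-- ===== VERDICT (by name: the statement is the Claim_ definition above) =====
theorem redact_email_spec : Claim_equal_redact_email := by
  unfold Claim_equal_redact_email Spec_redact_email redact_email redact_email_alt
  intro text _
  have h := pv_loop_inv text.toList.length text.toList [] [] (le_refl _) (by simp) (by simp) (by simp)
  simp only [List.nil_append, List.length_nil, Int.natCast_zero, add_zero] at h
  unfold pvLoopA
  rw [show (((text.toList.length : Int)) - 0).toNat = text.toList.length by omega, h]
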